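-- pv_equiv track=rewrite | github.com/dlejay/advent-of-code-2025 | day10/solution.py | solve
-- ===== SOURCE A (Python) =====
-- from itertools import combinations
-- from functools import reduce
-- from operator import xor
--
-- def solve(target, coins):
--     if target == 0:
--         return 0
--     n = 1
--     while True:
--         for combo in combinations(coins, n):
--             if target == reduce(xor, combo):
--                 return n
--         n += 1
-- ===== SOURCE B (Python) =====
-- def solve(target, coins):
--     # Choose/skip recursion over the coin list, returning the minimum subset
--     # size whose XOR equals t (None if impossible; there A loops forever).
--     def best(t, cs):
--         if not cs:
--             return 0 if t == 0 else None
--         a = best(t, cs[1:])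
--         b = best(t ^ cs[0], cs[1:])
--         if b is not None:
--             b = b + 1
--         if a is None:
--             return b
--         if b is None:
--             return a
--         return min(a, b)
--     return best(target, coins)
-- ===== Notes on version B (the rewrite author's own statement) =====
-- stated objective: alternative
-- what changed: Replaces A's unbounded size-by-size scan over itertools.combinations with a choose/skip recursion over the coin list that returns the minimum subset size directly (and None instead of looping forever when no subset works).
import Mathlib
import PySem

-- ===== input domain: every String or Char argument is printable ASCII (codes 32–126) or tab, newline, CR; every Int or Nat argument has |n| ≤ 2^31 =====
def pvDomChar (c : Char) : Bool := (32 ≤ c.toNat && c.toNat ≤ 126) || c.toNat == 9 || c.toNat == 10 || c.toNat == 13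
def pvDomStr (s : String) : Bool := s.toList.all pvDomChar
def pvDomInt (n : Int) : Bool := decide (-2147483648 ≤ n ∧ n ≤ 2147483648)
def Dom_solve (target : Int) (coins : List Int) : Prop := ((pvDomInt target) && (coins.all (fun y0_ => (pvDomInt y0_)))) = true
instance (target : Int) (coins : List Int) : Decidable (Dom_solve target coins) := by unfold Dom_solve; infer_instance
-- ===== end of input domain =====

-- B replaces A's size-by-size scan over itertools.combinations with a choose/skip
-- recursion over the coin list that returns the minimum subset size directly
-- (objective: alternative decomposition; same exponential worst case).

-- ===== PORT A =====
-- itertools.combinations(cs, n), in itertools order (lexicographic by position)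
def pvCombos (n : Nat) (cs : List Int) : List (List Int) :=
  match n, cs with
  | 0, _ => [[]]
  | _ + 1, [] => []
  | n + 1, c :: rest => (pvCombos n rest).map (c :: ·) ++ pvCombos (n + 1) rest

-- reduce(xor, combo); the [] case (reduce would raise) is never reached: A only
-- reduces combos of size n ≥ 1, which are nonempty
def pvReduceXor (l : List Int) : Int :=
  match l with
  | [] => 0
  | c :: rest => rest.foldl PySem.Int.bxor c

-- the 'while True: ... n += 1' loop; fuel bounds the sizes still worth trying:
-- past n = len(coins) every combinations() is empty and Python loops forever,
-- so fuel 0 (unreachable under Pre_solve) returns a dummy -1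
def pvLoopA (target : Int) (coins : List Int) : Nat → Nat → Int
  | _, 0 => -1
  | n, fuel + 1 =>
      if (pvCombos n coins).any (fun combo => target == pvReduceXor combo) then (n : Int)
      else pvLoopA target coins (n + 1) fuel

def solve (target : Int) (coins : List Int) : Int :=
  if target = 0 then 0 else pvLoopA target coins 1 coins.length

-- ===== PORT B =====
-- best(t, cs) from Source B: minimum size of a sub-multiset of cs XOR-ing to t
def pvBest (t : Int) : List Int → Option Int
  | [] => if t = 0 then some 0 else none
  | c :: cs =>
      let a := pvBest t cs
      let b := (pvBest (PySem.Int.bxor t c) cs).map (· + 1)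
      match a, b with
      | none, b => b
      | some x, none => some x
      | some x, some y => some (min x y)

-- Source B returns best(...) itself; under Pre_solve it is never None, so the
-- getD default is never used
def solve_alt (target : Int) (coins : List Int) : Int :=
  (pvBest target coins).getD 0

-- ===== PRECONDITION & SPEC =====
def pvXorL (s : List Int) : Int := s.foldr PySem.Int.bxor 0

-- Pre_: some sub-collection of the coins XORs to the target (the empty one
-- covers target = 0); on all other inputs Python A loops forever.
def Pre_solve (target : Int) (coins : List Int) : Prop :=
  ∃ s ∈ coins.sublists, pvXorL s = target
instance (target : Int) (coins : List Int) : Decidable (Pre_solve target coins) := by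
  unfold Pre_solve; infer_instance

def pvWitness_solve : Int × List Int := (3, [1, 2])

def Spec_solve (target : Int) (coins : List Int) (out : Int) : Prop := out = solve_alt target coins
instance (target : Int) (coins : List Int) (out : Int) : Decidable (Spec_solve target coins out) := by unfold Spec_solve; infer_instance

-- ===== CLAIM (what is proved, stated in full; the proofs are below) =====
def Claim_equal_solve : Prop := ∀ (target : Int) (coins : List Int), Dom_solve target coins → Pre_solve target coins → Spec_solve target coins (solve target coins)

-- ===== LEMMAS AND PROOFS =====

-- two's-complement representation of an Int
theorem pvIntRep (a : Int) : (∃ n : Nat, a = n) ∨ (∃ n : Nat, a = -n - 1) := by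
  by_cases h : 0 ≤ a
  · exact Or.inl ⟨a.toNat, by omega⟩
  · exact Or.inr ⟨(-a - 1).toNat, by omega⟩

theorem pvBxor_nn (x y : Nat) : PySem.Int.bxor (x : Int) (y : Int) = ((x ^^^ y : Nat) : Int) := by
  simp [PySem.Int.bxor, Int.natCast_nonneg]

theorem pvBxor_nm (x y : Nat) :
    PySem.Int.bxor (x : Int) (-(y : Int) - 1) = -((x ^^^ y : Nat) : Int) - 1 := by
  have hy : ¬ (0 : Int) ≤ -(y : Int) - 1 := by omega
  have h2 : (-(-(y : Int) - 1) - 1) = (y : Int) := by ring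
  simp [PySem.Int.bxor, Int.natCast_nonneg, hy, h2]
  omega

theorem pvBxor_mn (x y : Nat) :
    PySem.Int.bxor (-(x : Int) - 1) (y : Int) = -((x ^^^ y : Nat) : Int) - 1 := by
  have hx : ¬ (0 : Int) ≤ -(x : Int) - 1 := by omega
  have h2 : (-(-(x : Int) - 1) - 1) = (x : Int) := by ring
  simp [PySem.Int.bxor, Int.natCast_nonneg, hx, h2]
  omega

theorem pvBxor_mm (x y : Nat) :
    PySem.Int.bxor (-(x : Int) - 1) (-(y : Int) - 1) = ((x ^^^ y : Nat) : Int) := by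
  have hx : ¬ (0 : Int) ≤ -(x : Int) - 1 := by omega
  have hy : ¬ (0 : Int) ≤ -(y : Int) - 1 := by omega
  have h2 : (-(-(x : Int) - 1) - 1) = (x : Int) := by ring
  have h3 : (-(-(y : Int) - 1) - 1) = (y : Int) := by ring
  simp [PySem.Int.bxor, hx, hy, h2, h3]
  split_ifs <;> omega

theorem pvBxor_assoc (a b c : Int) :
    PySem.Int.bxor (PySem.Int.bxor a b) c = PySem.Int.bxor a (PySem.Int.bxor b c) := by
  rcases pvIntRep a with ⟨x, rfl⟩ | ⟨x, rfl⟩ <;>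
    rcases pvIntRep b with ⟨y, rfl⟩ | ⟨y, rfl⟩ <;>
      rcases pvIntRep c with ⟨z, rfl⟩ | ⟨z, rfl⟩ <;>
        simp only [pvBxor_nn, pvBxor_nm, pvBxor_mn, pvBxor_mm, Nat.xor_assoc]

theorem pvBxor_cancel (c x : Int) : PySem.Int.bxor c (PySem.Int.bxor c x) = x := by
  rw [← pvBxor_assoc, PySem.Int.bxor_self]
  simpa [PySem.Int.bxor_comm] using PySem.Int.bxor_zero x

theorem pvXorL_cons (c : Int) (s : List Int) :
    pvXorL (c :: s) = PySem.Int.bxor c (pvXorL s) := rfl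

theorem pvFoldl_bxor (l : List Int) : ∀ c : Int, l.foldl PySem.Int.bxor c = PySem.Int.bxor c (pvXorL l) := by
  induction l with
  | nil => intro c; simp [pvXorL, PySem.Int.bxor_zero]
  | cons d l ih =>
      intro c
      simp only [List.foldl_cons, ih, pvXorL_cons, pvBxor_assoc]

theorem pvReduceXor_eq (l : List Int) : pvReduceXor l = pvXorL l := by
  cases l with
  | nil => rfl
  | cons c rest => simp [pvReduceXor, pvFoldl_bxor, pvXorL_cons]

theorem pvMem_combos : ∀ (cs : List Int) (n : Nat) (s : List Int),
    s ∈ pvCombos n cs ↔ s.Sublist cs ∧ s.length = n := by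
  intro cs
  induction cs with
  | nil =>
      intro n s
      cases n with
      | zero => simp [pvCombos, List.sublist_nil]
      | succ n =>
          simp only [pvCombos, List.not_mem_nil, false_iff, not_and, List.sublist_nil]
          rintro rfl; simp
  | cons c rest ih =>
      intro n s
      cases n with
      | zero =>
          constructor
          · intro hs
            simp only [pvCombos, List.mem_singleton] at hs
            subst hs; exact ⟨List.nil_sublist _, rfl⟩
          · rintro ⟨-, hlen⟩
            have : s = [] := List.eq_nil_of_length_eq_zero hlen
            subst this; simp [pvCombos]
      | succ n =>
          simp only [pvCombos, List.mem_append, List.mem_map]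
          constructor
          · rintro (⟨s', hs', rfl⟩ | h)
            · rcases (ih n s').mp hs' with ⟨hsub, hlen⟩
              exact ⟨List.Sublist.cons₂ c hsub, by simp [hlen]⟩
            · rcases (ih (n + 1) s).mp h with ⟨hsub, hlen⟩
              exact ⟨hsub.cons c, hlen⟩
          · rintro ⟨hsub, hlen⟩
            rcases List.sublist_cons_iff.mp hsub with h | ⟨r, rfl, hr⟩
            · exact Or.inr ((ih (n + 1) s).mpr ⟨h, hlen⟩)
            · exact Or.inl ⟨r, (ih n r).mpr ⟨hr, by simpa using hlen⟩, rfl⟩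

-- the specification both programs compute: k is the minimum sublist size XOR-ing to t
def pvIsMin (t : Int) (cs : List Int) (k : Int) : Prop :=
  (∃ s, s.Sublist cs ∧ pvXorL s = t ∧ (s.length : Int) = k) ∧
    ∀ s, s.Sublist cs → pvXorL s = t → k ≤ (s.length : Int)

theorem pvBest_spec : ∀ (cs : List Int) (t : Int),
    (pvBest t cs = none ∧ ∀ s, s.Sublist cs → pvXorL s ≠ t) ∨
      ∃ k, pvBest t cs = some k ∧ pvIsMin t cs k := by
  intro cs
  induction cs with
  | nil =>
      intro t
      by_cases ht : t = 0
      · subst ht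
        refine Or.inr ⟨0, by simp [pvBest], ⟨⟨[], List.nil_sublist _, rfl, rfl⟩, ?_⟩⟩
        intro s hs _; simp
      · refine Or.inl ⟨by simp [pvBest, ht], ?_⟩
        intro s hs
        have : s = [] := List.sublist_nil.mp hs
        subst this; simpa [pvXorL] using fun h => ht h.symm
  | cons c cs ih =>
      intro t
      -- a sublist of c :: cs XORs to t iff it is a sublist of cs XOR-ing to t
      -- or c :: r for a sublist r of cs XOR-ing to bxor t c
      have key : ∀ r : List Int, pvXorL (c :: r) = t ↔ pvXorL r = PySem.Int.bxor t c := by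
        intro r
        rw [pvXorL_cons]
        constructor
        · intro h
          have h2 := congrArg (PySem.Int.bxor c) h
          rw [pvBxor_cancel] at h2
          rw [h2, PySem.Int.bxor_comm]
        · intro h
          rw [h, PySem.Int.bxor_comm t c, pvBxor_cancel]
      rcases ih t with ⟨ha, hnone⟩ | ⟨x, hx, ⟨⟨sx, hsx, hxs, hxl⟩, hxmin⟩⟩ <;>
        rcases ih (PySem.Int.bxor t c) with ⟨hb, hbnone⟩ | ⟨y, hy, ⟨⟨sy, hsy, hys, hyl⟩, hymin⟩⟩
      · -- both none
        refine Or.inl ⟨by simp [pvBest, ha, hb], ?_⟩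
        intro s hs
        rcases List.sublist_cons_iff.mp hs with h | ⟨r, rfl, hr⟩
        · exact hnone s h
        · intro hc; exact hbnone r hr ((key r).mp hc)
      · -- skip none, take some y
        refine Or.inr ⟨y + 1, by simp [pvBest, ha, hy], ⟨⟨c :: sy, List.Sublist.cons₂ c hsy, (key sy).mpr hys, by simp; omega⟩, ?_⟩⟩
        intro s hs hst
        rcases List.sublist_cons_iff.mp hs with h | ⟨r, rfl, hr⟩
        · exact absurd hst (hnone s h)
        · have := hymin r hr ((key r).mp hst); simp; omega
      · -- take none, skip some x
        refine Or.inr ⟨x, by simp [pvBest, hb, hx], ⟨⟨sx, hsx.cons c, hxs, hxl⟩, ?_⟩⟩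
        intro s hs hst
        rcases List.sublist_cons_iff.mp hs with h | ⟨r, rfl, hr⟩
        · exact hxmin s h hst
        · exact absurd ((key r).mp hst) (hbnone r hr)
      · -- both some
        refine Or.inr ⟨min x (y + 1), by simp [pvBest, hx, hy], ⟨?_, ?_⟩⟩
        · rcases le_total x (y + 1) with h | h
          · exact ⟨sx, hsx.cons c, hxs, by omega⟩
          · exact ⟨c :: sy, List.Sublist.cons₂ c hsy, (key sy).mpr hys, by simp; omega⟩
        · intro s hs hst
          rcases List.sublist_cons_iff.mp hs with h | ⟨r, rfl, hr⟩
          · have := hxmin s h hst; omega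
          · have := hymin r hr ((key r).mp hst); simp; omega

theorem pvAny_combos (t : Int) (cs : List Int) (n : Nat) :
    ((pvCombos n cs).any (fun combo => t == pvReduceXor combo) = true) ↔
      ∃ s, s.Sublist cs ∧ s.length = n ∧ pvXorL s = t := by
  simp only [List.any_eq_true, beq_iff_eq]
  constructor
  · rintro ⟨s, hmem, hst⟩
    rcases (pvMem_combos cs n s).mp hmem with ⟨hsub, hlen⟩
    exact ⟨s, hsub, hlen, by rw [← pvReduceXor_eq, hst]⟩
  · rintro ⟨s, hsub, hlen, hst⟩
    exact ⟨s, (pvMem_combos cs n s).mpr ⟨hsub, hlen⟩, by rw [pvReduceXor_eq, hst]⟩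

theorem pvLoopA_eq (t : Int) (cs : List Int) (k : Nat)
    (hex : ∃ s, s.Sublist cs ∧ pvXorL s = t ∧ s.length = k)
    (hmin : ∀ s, s.Sublist cs → pvXorL s = t → k ≤ s.length) :
    ∀ (fuel n : Nat), n ≤ k → k < n + fuel → pvLoopA t cs n fuel = (k : Int) := by
  intro fuel
  induction fuel with
  | zero => intro n h1 h2; omega
  | succ fuel ih =>
      intro n h1 h2
      by_cases heq : n = k
      · subst heq
        rcases hex with ⟨s, hsub, hst, hlen⟩
        have : (pvCombos n cs).any (fun combo => t == pvReduceXor combo) = true :=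
          (pvAny_combos t cs n).mpr ⟨s, hsub, hlen, hst⟩
        simp [pvLoopA, this]
      · have hlt : n < k := by omega
        have hfalse : ¬ ((pvCombos n cs).any (fun combo => t == pvReduceXor combo) = true) := by
          intro h
          rcases (pvAny_combos t cs n).mp h with ⟨s, hsub, hlen, hst⟩
          have := hmin s hsub hst; omega
        simp only [pvLoopA, hfalse, if_false]
        exact ih (n + 1) (by omega) (by omega)

-- ===== VERDICT (by name: the statement is the Claim_ definition above) =====
theorem solve_spec : Claim_equal_solve := by
  intro target coins _ hpre
  unfold Spec_solve
  rcases hpre with ⟨s0, hs0mem, hs0x⟩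
  have hs0 : s0.Sublist coins := (List.mem_sublists).mp hs0mem
  rcases pvBest_spec coins target with ⟨_, hnone⟩ | ⟨k, hk, ⟨⟨s, hsub, hsx, hslen⟩, hmin⟩⟩
  · exact absurd hs0x (hnone s0 hs0)
  · have halt : solve_alt target coins = k := by simp [solve_alt, hk]
    by_cases ht : target = 0
    · subst ht
      have h0 : k ≤ 0 := by simpa using hmin [] (List.nil_sublist _) rfl
      have h1 : (0 : Int) ≤ k := by rw [← hslen]; positivity
      have hk0 : k = 0 := le_antisymm h0 h1
      simp [solve, halt, hk0]
    · have hne : s ≠ [] := by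
        intro h; subst h; exact ht hsx.symm
      have hlen1 : 1 ≤ s.length := by
        cases s with
        | nil => exact absurd rfl hne
        | cons _ _ => simp
      have hminN : ∀ s', s'.Sublist coins → pvXorL s' = target → s.length ≤ s'.length := by
        intro s' h1 h2
        have := hmin s' h1 h2
        omega
      have hloop : pvLoopA target coins 1 coins.length = (s.length : Int) :=
        pvLoopA_eq target coins s.length ⟨s, hsub, hsx, rfl⟩ hminN coins.length 1 hlen1
          (by have := hsub.length_le; omega)
      simp [solve, ht, hloop, halt, ← hslen]
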